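-- pv_equiv track=rewrite | github.com/kimdamitung/ChuyenDe_IOT | Chuong_01/BaiTapCungCo/bai_2.py | String_has_five_diff_char
-- ===== SOURCE A (Python) =====
-- def String_has_five_diff_char(string):
-- 	count = 0
-- 	array = []
-- 	for i in string:
-- 		if i not in array:
-- 			array.append(i)
-- 			count += 1
-- 		if count >= 5:
-- 			return True
-- 	return False
-- ===== SOURCE B (Python) =====
-- def String_has_five_diff_char(string):
-- 	return len(set(string)) >= 5
-- ===== Notes on version B (the rewrite author's own statement) =====
-- stated objective: simpler
-- what changed: The running counter, membership-test branch and early return are replaced by one closed-form expression: build the set of distinct characters once and compare its size to 5.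
import Mathlib
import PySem

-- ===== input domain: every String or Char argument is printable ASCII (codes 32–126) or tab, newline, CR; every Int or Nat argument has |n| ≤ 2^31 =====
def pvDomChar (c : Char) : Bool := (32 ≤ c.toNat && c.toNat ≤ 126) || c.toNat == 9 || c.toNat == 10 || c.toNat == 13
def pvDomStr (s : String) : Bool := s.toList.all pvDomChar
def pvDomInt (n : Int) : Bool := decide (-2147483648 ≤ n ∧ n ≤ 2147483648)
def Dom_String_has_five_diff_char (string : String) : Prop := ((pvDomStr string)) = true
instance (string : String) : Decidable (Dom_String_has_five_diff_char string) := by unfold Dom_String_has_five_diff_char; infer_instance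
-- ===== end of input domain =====

-- B replaces A's counter/early-return loop by the closed form: size of the set of distinct characters ≥ 5 (simpler).


-- ===== PORT A =====
-- loop over the characters, carrying A's 'array' and 'count'; early return True inside the loop
def pvLoopA : List Char → List Char → Int → Bool
  | [], _, _ => false
  | i :: rest, array, count =>
    let array' := if array.contains i then array else array ++ [i]
    let count' := if array.contains i then count else count + 1
    if 5 ≤ count' then true else pvLoopA rest array' count'

def String_has_five_diff_char (string : String) : Bool :=
  pvLoopA string.toList [] 0

-- ===== PORT B =====
def String_has_five_diff_char_alt (string : String) : Bool :=
  decide (5 ≤ (PySem.Set.ofList string.toList).length)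

-- ===== PRECONDITION & SPEC =====
def Spec_String_has_five_diff_char (string : String) (out : Bool) : Prop := out = String_has_five_diff_char_alt string
instance (string : String) (out : Bool) : Decidable (Spec_String_has_five_diff_char string out) := by unfold Spec_String_has_five_diff_char; infer_instance

-- ===== CLAIM (what is proved, stated in full; the proofs are below) =====
def Claim_equal_String_has_five_diff_char : Prop := ∀ (string : String), Dom_String_has_five_diff_char string → Spec_String_has_five_diff_char string (String_has_five_diff_char string)

-- ===== LEMMAS AND PROOFS =====

theorem pvLen_le_foldl_add (l : List Char) (arr : List Char) :
    arr.length ≤ (l.foldl PySem.Set.add arr).length := by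
  induction l generalizing arr with
  | nil => simp
  | cons i rest ih =>
    refine le_trans ?_ (ih (PySem.Set.add arr i))
    simp [PySem.Set.add]
    split <;> simp

theorem pvLoopA_eq (l : List Char) (arr : List Char) (h : arr.length ≤ 4) :
    pvLoopA l arr (arr.length : Int) = decide (5 ≤ (l.foldl PySem.Set.add arr).length) := by
  induction l generalizing arr with
  | nil => simp [pvLoopA]; omega
  | cons i rest ih =>
    by_cases hm : i ∈ arr
    · have hc : arr.contains i = true := by simpa using hm
      have hadd : PySem.Set.add arr i = arr := by
        simp [PySem.Set.add, PySem.Set.contains, hm]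
      simp only [pvLoopA, hc, if_true, List.foldl_cons, hadd]
      have hlt : ¬ (5 ≤ (arr.length : Int)) := by omega
      rw [if_neg hlt]
      exact ih arr h
    · have hc : arr.contains i = false := by simpa using hm
      have hadd : PySem.Set.add arr i = arr ++ [i] := by
        simp [PySem.Set.add, PySem.Set.contains, hm]
      simp only [pvLoopA, hc, Bool.false_eq_true, if_false, List.foldl_cons, hadd]
      by_cases h5 : 5 ≤ (arr.length : Int) + 1
      · rw [if_pos h5]
        have hge := pvLen_le_foldl_add rest (arr ++ [i])
        have : 5 ≤ ((rest.foldl PySem.Set.add (arr ++ [i])).length) := by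
          simp at hge; omega
        simp [this]
      · rw [if_neg h5]
        have harr : ((arr ++ [i]).length : Int) = (arr.length : Int) + 1 := by simp
        rw [← harr]
        exact ih (arr ++ [i]) (by simp; omega)

-- ===== VERDICT (by name: the statement is the Claim_ definition above) =====
theorem String_has_five_diff_char_spec : Claim_equal_String_has_five_diff_char := by
  intro s _
  unfold Spec_String_has_five_diff_char String_has_five_diff_char String_has_five_diff_char_alt
  have := pvLoopA_eq s.toList [] (by simp)
  simpa [PySem.Set.ofList_eq_foldl] using this
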